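-- pv_equiv track=rewrite | github.com/mpygruu/advent-of-code-2022 | day09/tail_mover.py | move_tail
-- ===== SOURCE A (Python) =====
-- def move_tail(index, prev_row_index, prev_column_index, tail_row, tail_column):
--     possibilities_row = []
--     possibilities_column = []
--     for i in range(prev_row_index-1, prev_row_index+2):
--         for j in range(prev_column_index-1, prev_column_index+2):
--             for k in range(tail_row[index]-1, tail_row[index]+2):
--                 for l in range(tail_column[index]-1, tail_column[index]+2):
--                     if i == k and j == l:
--                         possibilities_row.append(i)
--                         possibilities_column.append(j)
--
--     if len(possibilities_row) == 3:
--         tail_row[index] = possibilities_row[1]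
--         tail_column[index] = possibilities_column[1]
--     elif len(possibilities_row) == 2:
--         if possibilities_row[0] != prev_row_index and possibilities_column[0] != prev_column_index:
--             tail_row[index] = possibilities_row[1]
--             tail_column[index] = possibilities_column[1]
--         else:
--             tail_row[index] = possibilities_row[0]
--             tail_column[index] = possibilities_column[0]
--     else:
--         tail_row[index] = possibilities_row[0]
--         tail_column[index] = possibilities_column[0]
--
--     return tail_row, tail_column
-- ===== SOURCE B (Python) =====
-- def move_tail(index, prev_row_index, prev_column_index, tail_row, tail_column):
--     # Arithmetic overlap of the two 3x3 neighborhoods: no loops at all.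
--     tr = tail_row[index]
--     tc = tail_column[index]
--     lo_r = max(prev_row_index, tr) - 1
--     hi_r = min(prev_row_index, tr) + 1
--     lo_c = max(prev_column_index, tc) - 1
--     hi_c = min(prev_column_index, tc) + 1
--     n_c = hi_c - lo_c + 1
--     n = (hi_r - lo_r + 1) * n_c
--     if n == 3:
--         r, c = lo_r + 1 // n_c, lo_c + 1 % n_c
--     elif n == 2:
--         if lo_r != prev_row_index and lo_c != prev_column_index:
--             r, c = lo_r + 1 // n_c, lo_c + 1 % n_c
--         else:
--             r, c = lo_r, lo_c
--     else:
--         r, c = lo_r, lo_c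
--     tail_row[index] = r
--     tail_column[index] = c
--     return tail_row, tail_column
-- ===== Notes on version B (the rewrite author's own statement) =====
-- stated objective: faster
-- what changed: Replaces the quadruple nested loop over 81 cell pairs (materialising the overlap cells in two lists) by O(1) arithmetic on the interval overlap of the two 3x3 neighborhoods: the overlap bounds lo/hi per axis give the candidate count n, and the selected cell (including the middle-of-three and two-candidate tie rule) is computed with index arithmetic (1//n_c, 1%n_c) instead of list indexing.
-- outside the precondition, e.g. on move_tail(0, 5, 0, [0], [0]): A raises IndexError, B returns ([4], [-1])
import Mathlib
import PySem

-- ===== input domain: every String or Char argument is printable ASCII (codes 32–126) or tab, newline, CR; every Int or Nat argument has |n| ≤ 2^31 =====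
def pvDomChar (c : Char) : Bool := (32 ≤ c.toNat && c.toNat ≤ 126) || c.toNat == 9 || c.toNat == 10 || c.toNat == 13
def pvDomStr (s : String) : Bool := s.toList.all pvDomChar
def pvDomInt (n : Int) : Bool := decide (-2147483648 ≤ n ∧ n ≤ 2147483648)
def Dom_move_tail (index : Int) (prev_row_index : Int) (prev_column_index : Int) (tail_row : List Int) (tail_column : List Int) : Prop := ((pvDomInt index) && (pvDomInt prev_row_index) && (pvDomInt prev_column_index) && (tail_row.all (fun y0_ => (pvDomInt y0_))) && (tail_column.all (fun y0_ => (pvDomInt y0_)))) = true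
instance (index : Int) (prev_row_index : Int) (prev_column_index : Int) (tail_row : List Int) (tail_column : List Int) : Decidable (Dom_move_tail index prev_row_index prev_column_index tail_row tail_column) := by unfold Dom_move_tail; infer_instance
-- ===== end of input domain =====

-- B replaces A's 81-iteration quadruple nested loop by O(1) interval-overlap arithmetic; both Pythons mutate
-- tail_row/tail_column in place identically (B performs the same mutation), the theorems are about the returned pair.

-- ===== PORT A =====
-- innermost loop: for l in range(tail_column[index]-1, tail_column[index]+2)
def loopL (i j k tc : Int) (acc : List Int × List Int) : List Int × List Int :=
  (PySem.List.pyRange (tc-1) (tc+2) 1).foldl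
    (fun acc l => if i == k && j == l then (acc.1 ++ [i], acc.2 ++ [j]) else acc) acc
-- for k in range(tail_row[index]-1, tail_row[index]+2)
def loopK (i j tr tc : Int) (acc : List Int × List Int) : List Int × List Int :=
  (PySem.List.pyRange (tr-1) (tr+2) 1).foldl (fun acc k => loopL i j k tc acc) acc
-- for j in range(prev_column_index-1, prev_column_index+2)
def loopJ (i pc tr tc : Int) (acc : List Int × List Int) : List Int × List Int :=
  (PySem.List.pyRange (pc-1) (pc+2) 1).foldl (fun acc j => loopK i j tr tc acc) acc
-- for i in range(prev_row_index-1, prev_row_index+2): builds (possibilities_row, possibilities_column)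
def possA (pr pc tr tc : Int) : List Int × List Int :=
  (PySem.List.pyRange (pr-1) (pr+2) 1).foldl (fun acc i => loopJ i pc tr tc acc) ([], [])

-- the if/elif/else selection of A (possibilities_row[0]/[1]; out-of-range reads are Python IndexError,
-- excluded by Pre_, pyGetD's default is never used inside Pre_)
def coreA (pr pc tr tc : Int) : Int × Int :=
  let p := possA pr pc tr tc
  if p.1.length == 3 then (PySem.List.pyGetD p.1 1 0, PySem.List.pyGetD p.2 1 0)
  else if p.1.length == 2 then
    if PySem.List.pyGetD p.1 0 0 != pr && PySem.List.pyGetD p.2 0 0 != pc then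
      (PySem.List.pyGetD p.1 1 0, PySem.List.pyGetD p.2 1 0)
    else (PySem.List.pyGetD p.1 0 0, PySem.List.pyGetD p.2 0 0)
  else (PySem.List.pyGetD p.1 0 0, PySem.List.pyGetD p.2 0 0)

def move_tail (index : Int) (prev_row_index : Int) (prev_column_index : Int) (tail_row : List Int) (tail_column : List Int) : List Int × List Int :=
  match PySem.List.pyGet? tail_row index, PySem.List.pyGet? tail_column index with
  | some tr, some tc =>
      let rc := coreA prev_row_index prev_column_index tr tc
      (PySem.List.pySetD tail_row index rc.1, PySem.List.pySetD tail_column index rc.2)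
  | _, _ => (tail_row, tail_column)  -- Python raises IndexError here; excluded by Pre_

-- ===== PORT B =====
-- Source B: arithmetic overlap of the two 3x3 neighborhoods, no loops
def coreB (pr pc tr tc : Int) : Int × Int :=
  let lo_r := max pr tr - 1
  let hi_r := min pr tr + 1
  let lo_c := max pc tc - 1
  let hi_c := min pc tc + 1
  let n_c := hi_c - lo_c + 1
  let n := (hi_r - lo_r + 1) * n_c
  if n == 3 then (lo_r + PySem.Int.floordiv 1 n_c, lo_c + PySem.Int.mod 1 n_c)
  else if n == 2 then
    if lo_r != pr && lo_c != pc then (lo_r + PySem.Int.floordiv 1 n_c, lo_c + PySem.Int.mod 1 n_c)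
    else (lo_r, lo_c)
  else (lo_r, lo_c)

-- tail_row[index]/tail_column[index] raise IndexError on an out-of-range index; that is excluded by
-- Pre_, so the total pyGetD/pySetD forms are exact here (their defaults are never used inside Pre_).
def move_tail_alt (index : Int) (prev_row_index : Int) (prev_column_index : Int) (tail_row : List Int) (tail_column : List Int) : List Int × List Int :=
  let tr := PySem.List.pyGetD tail_row index 0
  let tc := PySem.List.pyGetD tail_column index 0
  let rc := coreB prev_row_index prev_column_index tr tc
  (PySem.List.pySetD tail_row index rc.1, PySem.List.pySetD tail_column index rc.2)

-- ===== PRECONDITION & SPEC =====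
-- Pre_ excludes exactly the inputs where A raises: an out-of-range index (IndexError on tail_row[index]),
-- and knots more than 2 apart on some axis, where the overlap is empty and possibilities_row[0] raises IndexError.
def Pre_move_tail (index : Int) (prev_row_index : Int) (prev_column_index : Int) (tail_row : List Int) (tail_column : List Int) : Prop :=
  PySem.Raise.InRange tail_row.length index ∧ PySem.Raise.InRange tail_column.length index ∧
  (prev_row_index - PySem.List.pyGetD tail_row index 0).natAbs ≤ 2 ∧
  (prev_column_index - PySem.List.pyGetD tail_column index 0).natAbs ≤ 2
instance (index : Int) (prev_row_index : Int) (prev_column_index : Int) (tail_row : List Int) (tail_column : List Int) : Decidable (Pre_move_tail index prev_row_index prev_column_index tail_row tail_column) := by unfold Pre_move_tail; infer_instance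
def pvWitness_move_tail : Int × Int × Int × List Int × List Int := (0, 1, 1, [0], [0])

def Spec_move_tail (index : Int) (prev_row_index : Int) (prev_column_index : Int) (tail_row : List Int) (tail_column : List Int) (out : List Int × List Int) : Prop := out = move_tail_alt index prev_row_index prev_column_index tail_row tail_column
instance (index : Int) (prev_row_index : Int) (prev_column_index : Int) (tail_row : List Int) (tail_column : List Int) (out : List Int × List Int) : Decidable (Spec_move_tail index prev_row_index prev_column_index tail_row tail_column out) := by unfold Spec_move_tail; infer_instance

-- ===== CLAIM (what is proved, stated in full; the proofs are below) =====
def Claim_equal_move_tail : Prop := ∀ (index : Int) (prev_row_index : Int) (prev_column_index : Int) (tail_row : List Int) (tail_column : List Int), Dom_move_tail index prev_row_index prev_column_index tail_row tail_column → Pre_move_tail index prev_row_index prev_column_index tail_row tail_column → Spec_move_tail index prev_row_index prev_column_index tail_row tail_column (move_tail index prev_row_index prev_column_index tail_row tail_column)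

-- ===== LEMMAS AND PROOFS =====
def shiftP (s t : Int) (p : List Int × List Int) : List Int × List Int :=
  (p.1.map (· + s), p.2.map (· + t))

lemma pyRange3 (a : Int) : PySem.List.pyRange (a-1) (a+2) 1 = [a-1, a, a+1] := by
  rw [PySem.List.pyRange_one_cons (by omega), PySem.List.pyRange_one_cons (by omega),
      PySem.List.pyRange_one_cons (by omega), PySem.List.pyRange_one_eq_nil (by omega)]
  norm_num

lemma loopL_shift (s t i j k tc : Int) (acc : List Int × List Int) :
    loopL (i+s) (j+t) (k+s) (tc+t) (shiftP s t acc) = shiftP s t (loopL i j k tc acc) := by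
  simp only [loopL, shiftP, pyRange3, List.foldl, Bool.and_eq_true, beq_iff_eq]
  split_ifs <;> (try simp) <;> omega

lemma loopK_shift (s t i j tr tc : Int) (acc : List Int × List Int) :
    loopK (i+s) (j+t) (tr+s) (tc+t) (shiftP s t acc) = shiftP s t (loopK i j tr tc acc) := by
  simp only [loopK, pyRange3, List.foldl]
  rw [show tr+s-1 = (tr-1)+s from by ring, show tr+s+1 = (tr+1)+s from by ring]
  rw [loopL_shift, loopL_shift, loopL_shift]

lemma loopJ_shift (s t i pc tr tc : Int) (acc : List Int × List Int) :
    loopJ (i+s) (pc+t) (tr+s) (tc+t) (shiftP s t acc) = shiftP s t (loopJ i pc tr tc acc) := by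
  simp only [loopJ, pyRange3, List.foldl]
  rw [show pc+t-1 = (pc-1)+t from by ring, show pc+t+1 = (pc+1)+t from by ring]
  rw [loopK_shift, loopK_shift, loopK_shift]

lemma possA_shift (s t pr pc tr tc : Int) :
    possA (pr+s) (pc+t) (tr+s) (tc+t) = shiftP s t (possA pr pc tr tc) := by
  simp only [possA, pyRange3, List.foldl]
  rw [show pr+s-1 = (pr-1)+s from by ring, show pr+s+1 = (pr+1)+s from by ring]
  conv_lhs => rw [show (([], []) : List Int × List Int) = shiftP s t ([], []) from by simp [shiftP]]
  rw [loopJ_shift, loopJ_shift, loopJ_shift]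

lemma possA_off (d e tr tc : Int) :
    possA (tr + d) (tc + e) tr tc = shiftP tr tc (possA d e 0 0) := by
  have h := possA_shift tr tc d e 0 0
  rw [show d + tr = tr + d from by ring, show e + tc = tc + e from by ring,
      show (0:Int) + tr = tr from by ring, show (0:Int) + tc = tc from by ring] at h
  exact h

lemma coreB_shift (s t pr pc tr tc : Int) :
    coreB (pr+s) (pc+t) (tr+s) (tc+t) = ((coreB pr pc tr tc).1 + s, (coreB pr pc tr tc).2 + t) := by
  simp only [coreB, max_add_add_right, min_add_add_right]
  rw [show min pr tr + s + 1 - (max pr tr + s - 1) + 1 = min pr tr + 1 - (max pr tr - 1) + 1 from by ring,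
      show min pc tc + t + 1 - (max pc tc + t - 1) + 1 = min pc tc + 1 - (max pc tc - 1) + 1 from by ring,
      show (max pr tr + s - 1 != pr + s) = (max pr tr - 1 != pr) from by
        rw [Bool.eq_iff_iff]; simp only [bne_iff_ne]; constructor <;> intro h <;> omega,
      show (max pc tc + t - 1 != pc + t) = (max pc tc - 1 != pc) from by
        rw [Bool.eq_iff_iff]; simp only [bne_iff_ne]; constructor <;> intro h <;> omega]
  split_ifs <;> apply Prod.ext <;> dsimp only <;> ring

lemma coreB_off (d e tr tc : Int) :
    coreB (tr + d) (tc + e) tr tc = ((coreB d e 0 0).1 + tr, (coreB d e 0 0).2 + tc) := by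
  have h := coreB_shift tr tc d e 0 0
  rw [show d + tr = tr + d from by ring, show e + tc = tc + e from by ring,
      show (0:Int) + tr = tr from by ring, show (0:Int) + tc = tc from by ring] at h
  exact h

set_option maxHeartbeats 4000000 in
lemma core_eq (pr pc tr tc : Int)
    (h1 : (pr - tr).natAbs <= 2) (h2 : (pc - tc).natAbs <= 2) :
    coreA pr pc tr tc = coreB pr pc tr tc := by
  obtain ⟨d, hd1, hd2, rfl⟩ : ∃ d, -2 <= d ∧ d <= 2 ∧ pr = tr + d := ⟨pr - tr, by omega, by omega, by ring⟩
  obtain ⟨e, he1, he2, rfl⟩ : ∃ e, -2 <= e ∧ e <= 2 ∧ pc = tc + e := ⟨pc - tc, by omega, by omega, by ring⟩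
  interval_cases d <;> interval_cases e
  · simp only [coreA, possA_off, coreB_off,
      show possA (-2) (-2) 0 0 = ([(-1)], [(-1)]) from by decide,
      show coreB (-2) (-2) 0 0 = ((-1), (-1)) from by decide]
    simp only [shiftP, List.map_cons, List.map_nil, List.length_cons, List.length_nil,
      Nat.reduceAdd, Nat.reduceBEq, Bool.false_eq_true, if_false, if_true]
    norm_num [PySem.List.pyGetD_ofNat', Prod.ext_iff]
    try split_ifs <;> simp_all
    all_goals omega
  · simp only [coreA, possA_off, coreB_off,
      show possA (-2) (-1) 0 0 = ([(-1), (-1)], [(-1), 0]) from by decide,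
      show coreB (-2) (-1) 0 0 = ((-1), (-1)) from by decide]
    simp only [shiftP, List.map_cons, List.map_nil, List.length_cons, List.length_nil,
      Nat.reduceAdd, Nat.reduceBEq, Bool.false_eq_true, if_false, if_true]
    norm_num [PySem.List.pyGetD_ofNat', Prod.ext_iff]
    try split_ifs <;> simp_all
    all_goals omega
  · simp only [coreA, possA_off, coreB_off,
      show possA (-2) 0 0 0 = ([(-1), (-1), (-1)], [(-1), 0, 1]) from by decide,
      show coreB (-2) 0 0 0 = ((-1), 0) from by decide]
    simp only [shiftP, List.map_cons, List.map_nil, List.length_cons, List.length_nil,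
      Nat.reduceAdd, Nat.reduceBEq, Bool.false_eq_true, if_false, if_true]
    norm_num [PySem.List.pyGetD_ofNat', Prod.ext_iff]
    try split_ifs <;> simp_all
    all_goals omega
  · simp only [coreA, possA_off, coreB_off,
      show possA (-2) 1 0 0 = ([(-1), (-1)], [0, 1]) from by decide,
      show coreB (-2) 1 0 0 = ((-1), 1) from by decide]
    simp only [shiftP, List.map_cons, List.map_nil, List.length_cons, List.length_nil,
      Nat.reduceAdd, Nat.reduceBEq, Bool.false_eq_true, if_false, if_true]
    norm_num [PySem.List.pyGetD_ofNat', Prod.ext_iff]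
    try split_ifs <;> simp_all
    all_goals omega
  · simp only [coreA, possA_off, coreB_off,
      show possA (-2) 2 0 0 = ([(-1)], [1]) from by decide,
      show coreB (-2) 2 0 0 = ((-1), 1) from by decide]
    simp only [shiftP, List.map_cons, List.map_nil, List.length_cons, List.length_nil,
      Nat.reduceAdd, Nat.reduceBEq, Bool.false_eq_true, if_false, if_true]
    norm_num [PySem.List.pyGetD_ofNat', Prod.ext_iff]
    try split_ifs <;> simp_all
    all_goals omega
  · simp only [coreA, possA_off, coreB_off,
      show possA (-1) (-2) 0 0 = ([(-1), 0], [(-1), (-1)]) from by decide,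
      show coreB (-1) (-2) 0 0 = ((-1), (-1)) from by decide]
    simp only [shiftP, List.map_cons, List.map_nil, List.length_cons, List.length_nil,
      Nat.reduceAdd, Nat.reduceBEq, Bool.false_eq_true, if_false, if_true]
    norm_num [PySem.List.pyGetD_ofNat', Prod.ext_iff]
    try split_ifs <;> simp_all
    all_goals omega
  · simp only [coreA, possA_off, coreB_off,
      show possA (-1) (-1) 0 0 = ([(-1), (-1), 0, 0], [(-1), 0, (-1), 0]) from by decide,
      show coreB (-1) (-1) 0 0 = ((-1), (-1)) from by decide]
    simp only [shiftP, List.map_cons, List.map_nil, List.length_cons, List.length_nil,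
      Nat.reduceAdd, Nat.reduceBEq, Bool.false_eq_true, if_false, if_true]
    norm_num [PySem.List.pyGetD_ofNat', Prod.ext_iff]
    try split_ifs <;> simp_all
    all_goals omega
  · simp only [coreA, possA_off, coreB_off,
      show possA (-1) 0 0 0 = ([(-1), (-1), (-1), 0, 0, 0], [(-1), 0, 1, (-1), 0, 1]) from by decide,
      show coreB (-1) 0 0 0 = ((-1), (-1)) from by decide]
    simp only [shiftP, List.map_cons, List.map_nil, List.length_cons, List.length_nil,
      Nat.reduceAdd, Nat.reduceBEq, Bool.false_eq_true, if_false, if_true]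
    norm_num [PySem.List.pyGetD_ofNat', Prod.ext_iff]
    try split_ifs <;> simp_all
    all_goals omega
  · simp only [coreA, possA_off, coreB_off,
      show possA (-1) 1 0 0 = ([(-1), (-1), 0, 0], [0, 1, 0, 1]) from by decide,
      show coreB (-1) 1 0 0 = ((-1), 0) from by decide]
    simp only [shiftP, List.map_cons, List.map_nil, List.length_cons, List.length_nil,
      Nat.reduceAdd, Nat.reduceBEq, Bool.false_eq_true, if_false, if_true]
    norm_num [PySem.List.pyGetD_ofNat', Prod.ext_iff]
    try split_ifs <;> simp_all
    all_goals omega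
  · simp only [coreA, possA_off, coreB_off,
      show possA (-1) 2 0 0 = ([(-1), 0], [1, 1]) from by decide,
      show coreB (-1) 2 0 0 = ((-1), 1) from by decide]
    simp only [shiftP, List.map_cons, List.map_nil, List.length_cons, List.length_nil,
      Nat.reduceAdd, Nat.reduceBEq, Bool.false_eq_true, if_false, if_true]
    norm_num [PySem.List.pyGetD_ofNat', Prod.ext_iff]
    try split_ifs <;> simp_all
    all_goals omega
  · simp only [coreA, possA_off, coreB_off,
      show possA 0 (-2) 0 0 = ([(-1), 0, 1], [(-1), (-1), (-1)]) from by decide,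
      show coreB 0 (-2) 0 0 = (0, (-1)) from by decide]
    simp only [shiftP, List.map_cons, List.map_nil, List.length_cons, List.length_nil,
      Nat.reduceAdd, Nat.reduceBEq, Bool.false_eq_true, if_false, if_true]
    norm_num [PySem.List.pyGetD_ofNat', Prod.ext_iff]
    try split_ifs <;> simp_all
    all_goals omega
  · simp only [coreA, possA_off, coreB_off,
      show possA 0 (-1) 0 0 = ([(-1), (-1), 0, 0, 1, 1], [(-1), 0, (-1), 0, (-1), 0]) from by decide,
      show coreB 0 (-1) 0 0 = ((-1), (-1)) from by decide]
    simp only [shiftP, List.map_cons, List.map_nil, List.length_cons, List.length_nil,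
      Nat.reduceAdd, Nat.reduceBEq, Bool.false_eq_true, if_false, if_true]
    norm_num [PySem.List.pyGetD_ofNat', Prod.ext_iff]
    try split_ifs <;> simp_all
    all_goals omega
  · simp only [coreA, possA_off, coreB_off,
      show possA 0 0 0 0 = ([(-1), (-1), (-1), 0, 0, 0, 1, 1, 1], [(-1), 0, 1, (-1), 0, 1, (-1), 0, 1]) from by decide,
      show coreB 0 0 0 0 = ((-1), (-1)) from by decide]
    simp only [shiftP, List.map_cons, List.map_nil, List.length_cons, List.length_nil,
      Nat.reduceAdd, Nat.reduceBEq, Bool.false_eq_true, if_false, if_true]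
    norm_num [PySem.List.pyGetD_ofNat', Prod.ext_iff]
    try split_ifs <;> simp_all
    all_goals omega
  · simp only [coreA, possA_off, coreB_off,
      show possA 0 1 0 0 = ([(-1), (-1), 0, 0, 1, 1], [0, 1, 0, 1, 0, 1]) from by decide,
      show coreB 0 1 0 0 = ((-1), 0) from by decide]
    simp only [shiftP, List.map_cons, List.map_nil, List.length_cons, List.length_nil,
      Nat.reduceAdd, Nat.reduceBEq, Bool.false_eq_true, if_false, if_true]
    norm_num [PySem.List.pyGetD_ofNat', Prod.ext_iff]
    try split_ifs <;> simp_all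
    all_goals omega
  · simp only [coreA, possA_off, coreB_off,
      show possA 0 2 0 0 = ([(-1), 0, 1], [1, 1, 1]) from by decide,
      show coreB 0 2 0 0 = (0, 1) from by decide]
    simp only [shiftP, List.map_cons, List.map_nil, List.length_cons, List.length_nil,
      Nat.reduceAdd, Nat.reduceBEq, Bool.false_eq_true, if_false, if_true]
    norm_num [PySem.List.pyGetD_ofNat', Prod.ext_iff]
    try split_ifs <;> simp_all
    all_goals omega
  · simp only [coreA, possA_off, coreB_off,
      show possA 1 (-2) 0 0 = ([0, 1], [(-1), (-1)]) from by decide,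
      show coreB 1 (-2) 0 0 = (1, (-1)) from by decide]
    simp only [shiftP, List.map_cons, List.map_nil, List.length_cons, List.length_nil,
      Nat.reduceAdd, Nat.reduceBEq, Bool.false_eq_true, if_false, if_true]
    norm_num [PySem.List.pyGetD_ofNat', Prod.ext_iff]
    try split_ifs <;> simp_all
    all_goals omega
  · simp only [coreA, possA_off, coreB_off,
      show possA 1 (-1) 0 0 = ([0, 0, 1, 1], [(-1), 0, (-1), 0]) from by decide,
      show coreB 1 (-1) 0 0 = (0, (-1)) from by decide]
    simp only [shiftP, List.map_cons, List.map_nil, List.length_cons, List.length_nil,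
      Nat.reduceAdd, Nat.reduceBEq, Bool.false_eq_true, if_false, if_true]
    norm_num [PySem.List.pyGetD_ofNat', Prod.ext_iff]
    try split_ifs <;> simp_all
    all_goals omega
  · simp only [coreA, possA_off, coreB_off,
      show possA 1 0 0 0 = ([0, 0, 0, 1, 1, 1], [(-1), 0, 1, (-1), 0, 1]) from by decide,
      show coreB 1 0 0 0 = (0, (-1)) from by decide]
    simp only [shiftP, List.map_cons, List.map_nil, List.length_cons, List.length_nil,
      Nat.reduceAdd, Nat.reduceBEq, Bool.false_eq_true, if_false, if_true]
    norm_num [PySem.List.pyGetD_ofNat', Prod.ext_iff]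
    try split_ifs <;> simp_all
    all_goals omega
  · simp only [coreA, possA_off, coreB_off,
      show possA 1 1 0 0 = ([0, 0, 1, 1], [0, 1, 0, 1]) from by decide,
      show coreB 1 1 0 0 = (0, 0) from by decide]
    simp only [shiftP, List.map_cons, List.map_nil, List.length_cons, List.length_nil,
      Nat.reduceAdd, Nat.reduceBEq, Bool.false_eq_true, if_false, if_true]
    norm_num [PySem.List.pyGetD_ofNat', Prod.ext_iff]
    try split_ifs <;> simp_all
    all_goals omega
  · simp only [coreA, possA_off, coreB_off,
      show possA 1 2 0 0 = ([0, 1], [1, 1]) from by decide,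
      show coreB 1 2 0 0 = (1, 1) from by decide]
    simp only [shiftP, List.map_cons, List.map_nil, List.length_cons, List.length_nil,
      Nat.reduceAdd, Nat.reduceBEq, Bool.false_eq_true, if_false, if_true]
    norm_num [PySem.List.pyGetD_ofNat', Prod.ext_iff]
    try split_ifs <;> simp_all
    all_goals omega
  · simp only [coreA, possA_off, coreB_off,
      show possA 2 (-2) 0 0 = ([1], [(-1)]) from by decide,
      show coreB 2 (-2) 0 0 = (1, (-1)) from by decide]
    simp only [shiftP, List.map_cons, List.map_nil, List.length_cons, List.length_nil,
      Nat.reduceAdd, Nat.reduceBEq, Bool.false_eq_true, if_false, if_true]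
    norm_num [PySem.List.pyGetD_ofNat', Prod.ext_iff]
    try split_ifs <;> simp_all
    all_goals omega
  · simp only [coreA, possA_off, coreB_off,
      show possA 2 (-1) 0 0 = ([1, 1], [(-1), 0]) from by decide,
      show coreB 2 (-1) 0 0 = (1, (-1)) from by decide]
    simp only [shiftP, List.map_cons, List.map_nil, List.length_cons, List.length_nil,
      Nat.reduceAdd, Nat.reduceBEq, Bool.false_eq_true, if_false, if_true]
    norm_num [PySem.List.pyGetD_ofNat', Prod.ext_iff]
    try split_ifs <;> simp_all
    all_goals omega
  · simp only [coreA, possA_off, coreB_off,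
      show possA 2 0 0 0 = ([1, 1, 1], [(-1), 0, 1]) from by decide,
      show coreB 2 0 0 0 = (1, 0) from by decide]
    simp only [shiftP, List.map_cons, List.map_nil, List.length_cons, List.length_nil,
      Nat.reduceAdd, Nat.reduceBEq, Bool.false_eq_true, if_false, if_true]
    norm_num [PySem.List.pyGetD_ofNat', Prod.ext_iff]
    try split_ifs <;> simp_all
    all_goals omega
  · simp only [coreA, possA_off, coreB_off,
      show possA 2 1 0 0 = ([1, 1], [0, 1]) from by decide,
      show coreB 2 1 0 0 = (1, 1) from by decide]
    simp only [shiftP, List.map_cons, List.map_nil, List.length_cons, List.length_nil,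
      Nat.reduceAdd, Nat.reduceBEq, Bool.false_eq_true, if_false, if_true]
    norm_num [PySem.List.pyGetD_ofNat', Prod.ext_iff]
    try split_ifs <;> simp_all
    all_goals omega
  · simp only [coreA, possA_off, coreB_off,
      show possA 2 2 0 0 = ([1], [1]) from by decide,
      show coreB 2 2 0 0 = (1, 1) from by decide]
    simp only [shiftP, List.map_cons, List.map_nil, List.length_cons, List.length_nil,
      Nat.reduceAdd, Nat.reduceBEq, Bool.false_eq_true, if_false, if_true]
    norm_num [PySem.List.pyGetD_ofNat', Prod.ext_iff]
    try split_ifs <;> simp_all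
    all_goals omega

-- ===== VERDICT (by name: the statement is the Claim_ definition above) =====
theorem move_tail_spec : Claim_equal_move_tail := by
  intro index pr pc trow tcol hdom hpre
  obtain ⟨hir, hic, h1, h2⟩ := hpre
  unfold Spec_move_tail move_tail move_tail_alt
  rcases hg1 : PySem.List.pyGet? trow index with _ | tr
  · rw [PySem.List.pyGet?_eq_none_iff] at hg1 <;> exact absurd hir hg1
  rcases hg2 : PySem.List.pyGet? tcol index with _ | tc
  · rw [PySem.List.pyGet?_eq_none_iff] at hg2 <;> exact absurd hic hg2
  have e1 : PySem.List.pyGetD trow index 0 = tr := by simp [PySem.List.pyGetD, hg1]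
  have e2 : PySem.List.pyGetD tcol index 0 = tc := by simp [PySem.List.pyGetD, hg2]
  rw [e1] at h1; rw [e2] at h2
  dsimp only
  rw [e1, e2, core_eq pr pc tr tc h1 h2]
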